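-- pv_equiv track=rewrite | github.com/javierandres-dev/training-programming_challenges | 0x02/05-2020.py | search_column
-- ===== SOURCE A (Python) =====
-- import math
--
-- def search_column(three):
--     """ helper function to find column """
--     start = 0
--     end = 7
--     columns = start + end
--     for one in three:
--         if one == "L":
--             end = math.floor(columns / 2) + start
--             columns = end - start
--             if columns == 0:
--                 return end
--         if one == "R":
--             start = math.ceil(columns / 2) + start
--             columns = end - start
--             if columns == 0:
--                 return start
-- ===== SOURCE B (Python) =====
-- def search_column(three):
--     """ helper function to find column """
--     value = 0
--     count = 0
--     for ch in three:
--         if ch == "L":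
--             value = value * 2
--             count += 1
--         elif ch == "R":
--             value = value * 2 + 1
--             count += 1
--         if count == 3:
--             return value
--     return None
-- ===== Notes on version B (the rewrite author's own statement) =====
-- stated objective: simpler
-- what changed: Replaces the start/end/columns interval-narrowing (with math.floor/math.ceil halving) by a plain binary accumulator: value collects L=0/R=1 bits and is returned after the third valid character.
import Mathlib
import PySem

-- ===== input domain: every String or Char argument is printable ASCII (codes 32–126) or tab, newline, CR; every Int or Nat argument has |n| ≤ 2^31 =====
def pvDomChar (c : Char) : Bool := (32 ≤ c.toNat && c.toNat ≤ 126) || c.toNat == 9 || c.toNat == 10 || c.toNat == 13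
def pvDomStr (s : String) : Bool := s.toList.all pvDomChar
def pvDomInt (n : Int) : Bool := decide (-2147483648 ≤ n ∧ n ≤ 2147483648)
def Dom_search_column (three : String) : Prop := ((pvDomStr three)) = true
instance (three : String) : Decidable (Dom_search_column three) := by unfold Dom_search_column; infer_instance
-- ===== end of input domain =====

-- B replaces A's start/end/columns interval-narrowing by a plain L=0/R=1 bit accumulator (simpler, same O(n) cost).

-- ===== PORT A =====
-- math.floor(x/2) on these small ints is exact float arithmetic = PySem.Int.floordiv x 2;
-- math.ceil(x/2) = -((-x)//2). (state stays within [-2^4, 2^4]-sized values, so float division is exact)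
def searchColumnLoopA (start en columns : Int) : List Char → Option Int
  | [] => none
  | one :: rest =>
    -- first `if one == "L"` block (may return)
    let (s1, e1, c1, r1) :=
      if one = 'L' then
        let en' := PySem.Int.floordiv columns 2 + start
        let columns' := en' - start
        (start, en', columns', if columns' = 0 then some en' else none)
      else (start, en, columns, (none : Option Int))
    match r1 with
    | some v => some v
    | none =>
      -- second `if one == "R"` block (may return)
      if one = 'R' then
        let st' := (-(PySem.Int.floordiv (-c1) 2)) + s1
        let columns' := e1 - st'
        if columns' = 0 then some st' else searchColumnLoopA st' e1 columns' rest
      else searchColumnLoopA s1 e1 c1 rest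

def search_column (three : String) : Option Int :=
  searchColumnLoopA 0 7 (0 + 7) three.toList

-- ===== PORT B =====
def searchColumnLoopB (value count : Int) : List Char → Option Int
  | [] => none
  | ch :: rest =>
    let (v1, c1) :=
      if ch = 'L' then (value * 2, count + 1)
      else if ch = 'R' then (value * 2 + 1, count + 1)
      else (value, count)
    if c1 = 3 then some v1 else searchColumnLoopB v1 c1 rest

def search_column_alt (three : String) : Option Int :=
  searchColumnLoopB 0 0 three.toList

-- ===== PRECONDITION & SPEC =====
def Spec_search_column (three : String) (out : Option Int) : Prop := out = search_column_alt three
instance (three : String) (out : Option Int) : Decidable (Spec_search_column three out) := by unfold Spec_search_column; infer_instance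

-- ===== CLAIM (what is proved, stated in full; the proofs are below) =====
def Claim_equal_search_column : Prop := ∀ (three : String), Dom_search_column three → Spec_search_column three (search_column three)

-- ===== LEMMAS AND PROOFS =====

-- Invariant: after n valid characters decoding bits v, A's interval is
-- [v·2^(3-n), v·2^(3-n) + 2^(3-n) - 1] with columns = 2^(3-n) - 1.
lemma searchColumn_loop_eq (cs : List Char) : ∀ (v : Int) (n : Nat), n < 3 →
    searchColumnLoopA (v * 2 ^ (3 - n)) (v * 2 ^ (3 - n) + (2 ^ (3 - n) - 1)) (2 ^ (3 - n) - 1) cs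
      = searchColumnLoopB v (n : Int) cs := by
  induction cs with
  | nil => intro v n _; simp [searchColumnLoopA, searchColumnLoopB]
  | cons ch rest ih =>
    intro v n hn
    by_cases hL : ch = 'L'
    · subst hL
      interval_cases n
      · have h := ih (v * 2) 1 (by omega)
        simp only [searchColumnLoopA, searchColumnLoopB]
        norm_num [PySem.Int.floordiv, show Int.fdiv 7 2 = 3 by decide, show Int.fdiv 3 2 = 1 by decide, show Int.fdiv 1 2 = 0 by decide, show Int.fdiv (-7) 2 = -4 by decide, show Int.fdiv (-3) 2 = -2 by decide, show Int.fdiv (-1) 2 = -1 by decide, show ('L':Char) ≠ 'R' by decide] at h ⊢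
        convert h using 2 <;> ring
      · have h := ih (v * 2) 2 (by omega)
        simp only [searchColumnLoopA, searchColumnLoopB]
        norm_num [PySem.Int.floordiv, show Int.fdiv 7 2 = 3 by decide, show Int.fdiv 3 2 = 1 by decide, show Int.fdiv 1 2 = 0 by decide, show Int.fdiv (-7) 2 = -4 by decide, show Int.fdiv (-3) 2 = -2 by decide, show Int.fdiv (-1) 2 = -1 by decide, show ('L':Char) ≠ 'R' by decide] at h ⊢
        convert h using 2 <;> ring
      · simp only [searchColumnLoopA, searchColumnLoopB]
        norm_num [PySem.Int.floordiv, show Int.fdiv 7 2 = 3 by decide, show Int.fdiv 3 2 = 1 by decide, show Int.fdiv 1 2 = 0 by decide, show Int.fdiv (-7) 2 = -4 by decide, show Int.fdiv (-3) 2 = -2 by decide, show Int.fdiv (-1) 2 = -1 by decide, show ('L':Char) ≠ 'R' by decide]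
    · by_cases hR : ch = 'R'
      · subst hR
        interval_cases n
        · have h := ih (v * 2 + 1) 1 (by omega)
          simp only [searchColumnLoopA, searchColumnLoopB, if_neg hL]
          norm_num [PySem.Int.floordiv, show Int.fdiv 7 2 = 3 by decide, show Int.fdiv 3 2 = 1 by decide, show Int.fdiv 1 2 = 0 by decide, show Int.fdiv (-7) 2 = -4 by decide, show Int.fdiv (-3) 2 = -2 by decide, show Int.fdiv (-1) 2 = -1 by decide, show ('L':Char) ≠ 'R' by decide] at h ⊢
          rw [show v * 8 + 7 - (4 + v * 8) = (3:Int) by ring,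
            if_neg (by norm_num : ¬(3:Int) = 0),
            show (4:Int) + v * 8 = (v * 2 + 1) * 4 by ring,
            show v * 8 + 7 = (v * 2 + 1) * 4 + 3 by ring]
          exact h
        · have h := ih (v * 2 + 1) 2 (by omega)
          simp only [searchColumnLoopA, searchColumnLoopB, if_neg hL]
          norm_num [PySem.Int.floordiv, show Int.fdiv 7 2 = 3 by decide, show Int.fdiv 3 2 = 1 by decide, show Int.fdiv 1 2 = 0 by decide, show Int.fdiv (-7) 2 = -4 by decide, show Int.fdiv (-3) 2 = -2 by decide, show Int.fdiv (-1) 2 = -1 by decide, show ('L':Char) ≠ 'R' by decide] at h ⊢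
          rw [show v * 4 + 3 - (2 + v * 4) = (1:Int) by ring,
            if_neg (by norm_num : ¬(1:Int) = 0),
            show (2:Int) + v * 4 = (v * 2 + 1) * 2 by ring,
            show v * 4 + 3 = (v * 2 + 1) * 2 + 1 by ring]
          exact h
        · simp only [searchColumnLoopA, searchColumnLoopB, if_neg hL]
          norm_num [PySem.Int.floordiv, show Int.fdiv 7 2 = 3 by decide, show Int.fdiv 3 2 = 1 by decide, show Int.fdiv 1 2 = 0 by decide, show Int.fdiv (-7) 2 = -4 by decide, show Int.fdiv (-3) 2 = -2 by decide, show Int.fdiv (-1) 2 = -1 by decide, show ('L':Char) ≠ 'R' by decide]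
          rw [if_pos (show v * 2 + 1 - (1 + v * 2) = (0:Int) by ring)]
          congr 1
          ring
      · have h := ih v n hn
        simp only [searchColumnLoopA, searchColumnLoopB, if_neg hL, if_neg hR]
        have h3 : ((n : Int) = 3) = False := by simp; omega
        simpa [h3] using h

-- ===== VERDICT (by name: the statement is the Claim_ definition above) =====
theorem search_column_spec : Claim_equal_search_column := by
  intro three _
  unfold Spec_search_column search_column search_column_alt
  have h := searchColumn_loop_eq three.toList 0 0 (by omega)
  norm_num at h ⊢
  exact h
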